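-- pv_equiv track=rewrite | github.com/vllm-project/vllm-ascend | vllm_ascend/distributed/kv_transfer/kv_pool/ascend_store/pool_worker.py | check_all_layers_exists
-- ===== SOURCE A (Python) =====
-- def check_all_layers_exists(res: list[int], num_layers: int) -> list[int]:
--     total_chunks = len(res) // num_layers
--     result = []
--
--     for chunk_idx in range(total_chunks):
--         start = chunk_idx * num_layers
--         end = start + num_layers
--         chunk = res[start:end]
--         result.append(1 if all(x == 1 for x in chunk) else 0)
--
--     return result
-- ===== SOURCE B (Python) =====
-- def check_all_layers_exists(res: list[int], num_layers: int) -> list[int]: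
--     result = [1] * (len(res) // num_layers)
--     for i in range(len(result) * num_layers):
--         if res[i] != 1:
--             result[i // num_layers] = 0
--     return result
-- ===== Notes on version B (the rewrite author's own statement) =====
-- stated objective: alternative
-- what changed: Replaces the per-chunk slice + all() reduction with a single flat element scan over range(total_chunks*num_layers) that clears flags by index arithmetic (i // num_layers) in a preallocated [1]*total_chunks result.
-- outside the precondition, e.g. on check_all_layers_exists([1, 1], 0): A raises ZeroDivisionError, B raises ZeroDivisionError
import Mathlib
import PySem

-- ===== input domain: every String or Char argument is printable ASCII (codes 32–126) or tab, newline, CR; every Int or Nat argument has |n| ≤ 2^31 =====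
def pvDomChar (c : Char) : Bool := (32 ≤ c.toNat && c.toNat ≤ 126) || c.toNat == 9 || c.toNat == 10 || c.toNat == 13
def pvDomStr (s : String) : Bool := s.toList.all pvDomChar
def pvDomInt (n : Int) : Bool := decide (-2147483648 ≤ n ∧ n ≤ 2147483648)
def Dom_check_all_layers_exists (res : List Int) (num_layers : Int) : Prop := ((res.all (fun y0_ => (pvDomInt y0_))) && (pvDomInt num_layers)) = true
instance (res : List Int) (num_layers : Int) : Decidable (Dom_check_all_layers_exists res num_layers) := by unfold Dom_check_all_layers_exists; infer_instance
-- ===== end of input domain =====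

-- B replaces A's chunk-slice-plus-all() reduction by one flat indexed scan writing 0-flags
-- into a preallocated [1]*total_chunks result (objective: alternative decomposition, same cost).

-- ===== PORT A =====
def check_all_layers_exists (res : List Int) (num_layers : Int) : List Int :=
  let total_chunks := PySem.Int.floordiv (res.length : Int) num_layers
  (PySem.List.pyRange 0 total_chunks 1).foldl
    (fun result chunk_idx =>
      let start := chunk_idx * num_layers
      let stop := start + num_layers
      let chunk := PySem.List.slice res (some start) (some stop)
      result ++ [if chunk.all (fun x => x == 1) then (1 : Int) else 0]) []

-- ===== PORT B =====
-- pyGetD/pySetD are total forms of res[i] / result[j] = 0; in Source B's loop both indices are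
-- always in range (proved below), so the defaults are never taken.
def check_all_layers_exists_alt (res : List Int) (num_layers : Int) : List Int :=
  let result := List.replicate (PySem.Int.floordiv (res.length : Int) num_layers).toNat (1 : Int)
  (PySem.List.pyRange 0 ((result.length : Int) * num_layers) 1).foldl
    (fun result i =>
      if PySem.List.pyGetD res i 0 ≠ 1 then
        PySem.List.pySetD result (PySem.Int.floordiv i num_layers) 0
      else result) result

-- ===== PRECONDITION & SPEC =====
-- Pre_ excludes only num_layers = 0, where Python A raises ZeroDivisionError.
def Pre_check_all_layers_exists (res : List Int) (num_layers : Int) : Prop := num_layers ≠ 0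
instance (res : List Int) (num_layers : Int) : Decidable (Pre_check_all_layers_exists res num_layers) := by unfold Pre_check_all_layers_exists; infer_instance

def pvWitness_check_all_layers_exists : List Int × Int := ([1, 1, 0, 1], 2)

def Spec_check_all_layers_exists (res : List Int) (num_layers : Int) (out : List Int) : Prop := out = check_all_layers_exists_alt res num_layers
instance (res : List Int) (num_layers : Int) (out : List Int) : Decidable (Spec_check_all_layers_exists res num_layers out) := by unfold Spec_check_all_layers_exists; infer_instance

-- ===== CLAIM (what is proved, stated in full; the proofs are below) =====
def Claim_equal_check_all_layers_exists : Prop := ∀ (res : List Int) (num_layers : Int), Dom_check_all_layers_exists res num_layers → Pre_check_all_layers_exists res num_layers → Spec_check_all_layers_exists res num_layers (check_all_layers_exists res num_layers)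

-- ===== LEMMAS AND PROOFS =====

-- the per-chunk flag both programs compute
def pvChunkFlag (res : List Int) (L : Nat) (c : Nat) : Int :=
  if ((res.drop (c * L)).take L).all (fun x => x == 1) then 1 else 0

-- B's loop body, at Nat level
def pvStep (res : List Int) (L : Nat) (r : List Int) (k : Nat) : List Int :=
  if res.getD k 0 ≠ 1 then r.set (k / L) 0 else r

lemma pvStep_length (res : List Int) (L : Nat) (r : List Int) (k : Nat) :
    (pvStep res L r k).length = r.length := by
  unfold pvStep; split <;> simp

-- a fold whose sets all land inside r leaves an appended tail untouched
lemma pv_fold_append (res : List Int) (L : Nat) (ks : List Nat) :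
    ∀ (r s : List Int), (∀ k ∈ ks, k / L < r.length) →
      ks.foldl (pvStep res L) (r ++ s) = (ks.foldl (pvStep res L) r) ++ s := by
  induction ks with
  | nil => intro r s _; rfl
  | cons k ks ih =>
    intro r s h
    have hk : k / L < r.length := h k (List.mem_cons_self ..)
    have hstep : pvStep res L (r ++ s) k = pvStep res L r k ++ s := by
      unfold pvStep; split
      · exact List.set_append_left _ _ hk
      · rfl
    simp only [List.foldl_cons, hstep]
    exact ih _ s (fun k' hk' => by rw [pvStep_length]; exact h k' (List.mem_cons_of_mem _ hk'))

-- a fold whose sets all hit exactly the last slot turns the last slot into 0 iff some element is bad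
lemma pv_fold_last (res : List Int) (L : Nat) (ks : List Nat) :
    ∀ (M : List Int) (v : Int), (∀ k ∈ ks, k / L = M.length) →
      ks.foldl (pvStep res L) (M ++ [v])
        = M ++ [if ks.any (fun k => decide (res.getD k 0 ≠ 1)) then 0 else v] := by
  induction ks with
  | nil => intro M v _; simp
  | cons k ks ih =>
    intro M v h
    have hk : k / L = M.length := h k (List.mem_cons_self ..)
    have htail := fun k' hk' => h k' (List.mem_cons_of_mem k hk')
    by_cases hb : res.getD k 0 ≠ 1
    · have hb' : ¬ res[k]?.getD 0 = 1 := by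
        simpa [List.getD_eq_getElem?_getD] using hb
      have hstep : pvStep res L (M ++ [v]) k = M ++ [0] := by
        unfold pvStep
        rw [if_pos hb, hk, List.set_append_right _ _ (le_refl _)]
        simp
      simp only [List.foldl_cons, hstep, ih M 0 htail]
      simp [List.getD_eq_getElem?_getD, hb']
    · have hbe : res[k]?.getD 0 = 1 := by
        simpa [List.getD_eq_getElem?_getD] using not_not.mp hb
      have hstep : pvStep res L (M ++ [v]) k = M ++ [v] := by unfold pvStep; rw [if_neg hb]
      simp only [List.foldl_cons, hstep, ih M v htail]
      simp [List.getD_eq_getElem?_getD, hbe]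

-- the chunk slice, as an indexed map
lemma pv_chunk_as_map (res : List Int) (L a : Nat) (hb : a + L ≤ res.length) :
    (res.drop a).take L = (List.range L).map (fun j => res.getD (a + j) 0) := by
  apply List.ext_getElem
  · simp; omega
  · intro j h1 h2
    have hj : j < L := by simpa using h2
    have : a + j < res.length := by omega
    simp [List.getElem_take, List.getElem_drop, List.getD_eq_getElem?_getD,
          List.getElem?_eq_getElem this, hj]

lemma pv_flag_eq (res : List Int) (L T : Nat) (hb : T * L + L ≤ res.length) :
    pvChunkFlag res L T
      = if ((List.range L).map (fun j => T * L + j)).any (fun k => decide (res.getD k 0 ≠ 1))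
        then 0 else 1 := by
  unfold pvChunkFlag
  rw [pv_chunk_as_map res L (T * L) hb]
  simp only [List.all_map, List.any_map, Function.comp, List.all_eq_true, List.any_eq_true,
    List.mem_range, beq_iff_eq, decide_eq_true_eq]
  by_cases hall : ∀ j < L, res.getD (T * L + j) 0 = 1
  · rw [if_pos, if_neg]
    · rintro ⟨j, hj, hne⟩
      exact hne (hall j hj)
    · intro j hj
      exact hall j hj
  · rw [if_neg, if_pos]
    · push_neg at hall
      exact hall
    · intro hcon
      push_neg at hall
      obtain ⟨j, hj, hne⟩ := hall
      exact hne (hcon j hj)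

-- the flat fold over T full chunks computes the list of chunk flags
lemma pv_flat_fold (res : List Int) (L : Nat) (hL : 0 < L) :
    ∀ T : Nat, T * L ≤ res.length →
      (List.range (T * L)).foldl (pvStep res L) (List.replicate T (1 : Int))
        = (List.range T).map (pvChunkFlag res L) := by
  intro T
  induction T with
  | zero => intro _; simp
  | succ T ih =>
    intro hb
    have hb' : T * L ≤ res.length := le_trans (Nat.mul_le_mul_right L (Nat.le_succ T)) hb
    have hTL : (T + 1) * L = T * L + L := by ring
    have hdivlt : ∀ k ∈ List.range (T * L), k / L < (List.replicate T (1 : Int)).length := by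
      intro k hk
      rw [List.length_replicate]
      exact (Nat.div_lt_iff_lt_mul hL).mpr (by simpa using hk)
    have hdiveq : ∀ k ∈ (List.range L).map (fun j => T * L + j),
        k / L = ((List.range T).map (pvChunkFlag res L)).length := by
      intro k hk
      simp only [List.mem_map, List.mem_range] at hk
      obtain ⟨j, hj, rfl⟩ := hk
      rw [List.length_map, List.length_range, Nat.add_comm (T * L) j, Nat.mul_comm T L,
          Nat.add_mul_div_left _ _ hL, Nat.div_eq_of_lt hj, Nat.zero_add]
    rw [hTL, List.range_add, List.foldl_append, List.replicate_succ',
        pv_fold_append res L _ _ _ hdivlt, ih hb',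
        pv_fold_last res L _ _ _ hdiveq,
        List.range_succ, List.map_append, List.map_singleton,
        pv_flag_eq res L T (by omega)]

-- A, for positive num_layers, is the list of chunk flags
lemma pv_A_pos (res : List Int) (L : Nat) (hL : 0 < L) :
    check_all_layers_exists res (L : Int)
      = (List.range (res.length / L)).map (pvChunkFlag res L) := by
  unfold check_all_layers_exists
  simp only [PySem.Int.floordiv_natCast, PySem.List.foldl_append_singleton_eq_map]
  rw [PySem.List.pyRange_one]
  simp only [zero_add, Int.sub_zero, Int.toNat_natCast, List.map_map]
  apply List.map_congr_left
  intro c _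
  simp only [Function.comp]
  have h1 : ((c : Int) * (L : Int)) = ((c * L : Nat) : Int) := by push_cast; ring
  rw [h1, PySem.List.slice_natCast_add]
  rfl

-- B, for positive num_layers, is the flat fold over the chunk indices
lemma pv_B_pos (res : List Int) (L : Nat) (hL : 0 < L) :
    check_all_layers_exists_alt res (L : Int)
      = (List.range (res.length / L * L)).foldl (pvStep res L)
          (List.replicate (res.length / L) (1 : Int)) := by
  unfold check_all_layers_exists_alt
  simp only [PySem.Int.floordiv_natCast, Int.toNat_natCast, List.length_replicate]
  have h1 : ((res.length / L : Nat) : Int) * (L : Int) = ((res.length / L * L : Nat) : Int) := by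
    push_cast; ring
  rw [h1, PySem.List.pyRange_one]
  simp only [Int.sub_zero, Int.toNat_natCast, List.foldl_map]
  congr 1
  funext r k
  simp only [zero_add, PySem.Int.floordiv_natCast, PySem.List.pyGetD_natCast,
    PySem.List.pySetD_natCast, pvStep]

-- for negative num_layers both programs return []
lemma pv_neg (res : List Int) (nl : Int) (h : nl < 0) :
    check_all_layers_exists res nl = [] ∧ check_all_layers_exists_alt res nl = [] := by
  have ht : PySem.Int.floordiv (res.length : Int) nl ≤ 0 := by
    by_contra hc
    push_neg at hc
    have hs := PySem.Int.floordiv_mul_add_mod (res.length : Int) nl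
    have hm := PySem.Int.mod_neg_bounds (a := (res.length : Int)) (b := nl) h
    have h1 : PySem.Int.floordiv (res.length : Int) nl * nl ≤ 1 * nl := by
      apply mul_le_mul_of_nonpos_right _ (le_of_lt h)
      omega
    have h0 : (0 : Int) ≤ (res.length : Int) := by positivity
    omega
  constructor
  · simp only [check_all_layers_exists, PySem.List.pyRange_one_eq_nil ht, List.foldl_nil]
  · have h2 : (PySem.Int.floordiv (res.length : Int) nl).toNat = 0 := Int.toNat_of_nonpos ht
    simp only [check_all_layers_exists_alt, h2, List.replicate_zero, List.length_nil,
      Nat.cast_zero, zero_mul, PySem.List.pyRange_one_eq_nil (le_refl (0 : Int)),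
      List.foldl_nil]

-- ===== VERDICT (by name: the statement is the Claim_ definition above) =====
theorem check_all_layers_exists_spec : Claim_equal_check_all_layers_exists := by
  unfold Claim_equal_check_all_layers_exists
  intro res nl _ hpre
  unfold Spec_check_all_layers_exists
  unfold Pre_check_all_layers_exists at hpre
  rcases lt_trichotomy nl 0 with h | h | h
  · obtain ⟨hA, hB⟩ := pv_neg res nl h
    rw [hA, hB]
  · exact absurd h hpre
  · have hL : nl = ((nl.toNat : Nat) : Int) := (Int.toNat_of_nonneg (le_of_lt h)).symm
    have hLpos : 0 < nl.toNat := by omega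
    rw [hL, pv_A_pos res nl.toNat hLpos, pv_B_pos res nl.toNat hLpos,
        pv_flat_fold res nl.toNat hLpos _ (Nat.div_mul_le_self _ _)]
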